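-- pv_equiv track=rewrite | github.com/Gheavenfl/2017A2CS | Chapter25/recursion.py | array220
-- ===== SOURCE A (Python) =====
-- def array220(X,I):
--     a=len(X)
--     if I>a-2:
--         return False
--     if X[I+1]==10*X[I]:
--         return True
--     else:
--         return array220(X,I+1)
-- ===== SOURCE B (Python) =====
-- def array220(X, I):
--     for i in range(I, len(X) - 1):
--         if X[i + 1] == 10 * X[i]:
--             return True
--     return False
-- ===== Notes on version B (the rewrite author's own statement) =====
-- stated objective: simpler
-- what changed: Replaces the tail recursion with a single iterative for-loop over range(I, len(X)-1) that returns on the first adjacent pair with ratio ten.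
import Mathlib
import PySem

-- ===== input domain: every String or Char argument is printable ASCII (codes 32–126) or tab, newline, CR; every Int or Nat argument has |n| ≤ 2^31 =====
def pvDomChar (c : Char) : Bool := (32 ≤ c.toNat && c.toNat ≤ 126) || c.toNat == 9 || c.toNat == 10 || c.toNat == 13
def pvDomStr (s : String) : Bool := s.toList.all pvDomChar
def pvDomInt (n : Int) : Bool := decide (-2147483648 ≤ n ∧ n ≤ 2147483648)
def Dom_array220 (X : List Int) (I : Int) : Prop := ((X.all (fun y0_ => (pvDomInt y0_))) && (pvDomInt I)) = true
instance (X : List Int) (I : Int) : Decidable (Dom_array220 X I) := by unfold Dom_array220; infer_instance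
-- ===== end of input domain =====

-- B replaces A's tail recursion by one iterative scan over range(I, len(X)-1) (simpler decomposition, same cost).

-- ===== PORT A =====
def array220 (X : List Int) (I : Int) : Bool :=
  let a : Int := X.length
  if I > a - 2 then false
  else if PySem.List.pyGetD X (I + 1) 0 == 10 * PySem.List.pyGetD X I 0 then true
  else array220 X (I + 1)
termination_by ((X.length : Int) - 1 - I).toNat
decreasing_by omega

-- ===== PORT B =====
def array220_alt (X : List Int) (I : Int) : Bool :=
  (PySem.List.pyRange I ((X.length : Int) - 1) 1).any
    (fun i => PySem.List.pyGetD X (i + 1) 0 == 10 * PySem.List.pyGetD X i 0)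

-- ===== PRECONDITION & SPEC =====
-- Pre_ excludes exactly the inputs where the Python A raises IndexError (I below -len(X)
-- while the I > len-2 guard has not yet fired); B raises there too.
def Pre_array220 (X : List Int) (I : Int) : Prop :=
  -(X.length : Int) ≤ I ∨ I > (X.length : Int) - 2
instance (X : List Int) (I : Int) : Decidable (Pre_array220 X I) := by
  unfold Pre_array220; infer_instance
def pvWitness_array220 : List Int × Int := ([1, 10], 0)

def Spec_array220 (X : List Int) (I : Int) (out : Bool) : Prop := out = array220_alt X I
instance (X : List Int) (I : Int) (out : Bool) : Decidable (Spec_array220 X I out) := by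
  unfold Spec_array220; infer_instance

-- ===== CLAIM (what is proved, stated in full; the proofs are below) =====
def Claim_equal_array220 : Prop := ∀ (X : List Int) (I : Int), Dom_array220 X I → Pre_array220 X I → Spec_array220 X I (array220 X I)

-- ===== LEMMAS AND PROOFS =====
theorem array220_eq_alt (X : List Int) (I : Int) : array220 X I = array220_alt X I := by
  refine array220.induct X (fun I => array220 X I = array220_alt X I) ?_ ?_ ?_ I
  · intro I _a hguard
    show array220 X I = array220_alt X I
    rw [array220.eq_def]
    rw [if_pos hguard]
    have h0 : PySem.List.pyRange I ((X.length : Int) - 1) 1 = [] :=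
      PySem.List.pyRange_one_eq_nil (by omega)
    simp [array220_alt, h0]
  · intro I _a hguard hpair
    show array220 X I = array220_alt X I
    rw [array220.eq_def]
    rw [if_neg hguard, if_pos hpair]
    have hcons : PySem.List.pyRange I ((X.length : Int) - 1) 1
        = I :: PySem.List.pyRange (I + 1) ((X.length : Int) - 1) 1 :=
      PySem.List.pyRange_one_cons (by omega)
    simp [array220_alt, hcons, hpair]
  · intro I _a hguard hpair ih
    show array220 X I = array220_alt X I
    have ih' : array220 X (I + 1) = array220_alt X (I + 1) := ih
    rw [array220.eq_def]
    rw [if_neg hguard, if_neg hpair]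
    have hcons : PySem.List.pyRange I ((X.length : Int) - 1) 1
        = I :: PySem.List.pyRange (I + 1) ((X.length : Int) - 1) 1 :=
      PySem.List.pyRange_one_cons (by omega)
    simp only [array220_alt, hcons, List.any_cons] at ih' ⊢
    simp only [Bool.not_eq_true] at hpair
    simp [hpair, ih']

-- ===== VERDICT (by name: the statement is the Claim_ definition above) =====
theorem array220_spec : Claim_equal_array220 := by
  intro X I _ _
  exact array220_eq_alt X I
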